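-- pv_equiv track=rewrite | github.com/EmperorKnight/TrabajoFinalS8 | ejercicio2.py | contar_computadoras
-- ===== SOURCE A (Python) =====
-- def contar_computadoras(lab):
--     ocupadas = 0
--     libres = 0
--     for fila in lab:
--         for computadora in fila:
--             if computadora == 1:
--                 ocupadas += 1
--             else:
--                 libres += 1
--     return ocupadas, libres
-- ===== SOURCE B (Python) =====
-- def contar_computadoras(lab):
--     cells = [c for fila in lab for c in fila]
--
--     def ocupadas_en(lo, hi):
--         # divide-and-conquer count of cells equal to 1 in cells[lo:hi]
--         if hi - lo == 0:
--             return 0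
--         if hi - lo == 1:
--             return 1 if cells[lo] == 1 else 0
--         mid = (lo + hi) // 2
--         return ocupadas_en(lo, mid) + ocupadas_en(mid, hi)
--
--     ocupadas = ocupadas_en(0, len(cells))
--     return ocupadas, len(cells) - ocupadas
-- ===== Notes on version B (the rewrite author's own statement) =====
-- stated objective: alternative
-- what changed: Flattens the grid once, counts occupied cells by divide-and-conquer recursion over index intervals instead of A's nested accumulator loops with per-cell if/else, and derives the free count arithmetically as total minus occupied.
import Mathlib
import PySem

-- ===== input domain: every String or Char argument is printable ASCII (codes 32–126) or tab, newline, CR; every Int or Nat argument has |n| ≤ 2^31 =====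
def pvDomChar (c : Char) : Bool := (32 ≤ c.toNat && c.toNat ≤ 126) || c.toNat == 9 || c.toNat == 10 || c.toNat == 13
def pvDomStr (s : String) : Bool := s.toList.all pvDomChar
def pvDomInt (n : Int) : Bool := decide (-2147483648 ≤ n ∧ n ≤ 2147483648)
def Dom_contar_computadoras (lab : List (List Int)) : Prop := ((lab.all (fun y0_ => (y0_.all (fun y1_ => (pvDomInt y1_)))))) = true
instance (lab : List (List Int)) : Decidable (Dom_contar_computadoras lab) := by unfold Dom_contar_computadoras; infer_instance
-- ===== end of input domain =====

-- B flattens the grid and counts occupied cells by divide-and-conquer over index intervals,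
-- deriving the free count as total - occupied (alternative decomposition, same cost).

-- ===== PORT A =====
-- nested loops with a per-cell if/else over the (ocupadas, libres) accumulator pair
def contar_computadoras (lab : List (List Int)) : Int × Int :=
  lab.foldl (fun acc fila =>
    fila.foldl (fun acc2 computadora =>
      if computadora == 1 then (acc2.1 + 1, acc2.2) else (acc2.1, acc2.2 + 1)) acc) (0, 0)

-- ===== PORT B =====
-- ocupadas_en(lo, hi): divide-and-conquer count of 1s in cells[lo:hi].
-- lo/hi are nonnegative Python ints kept as Nat; cells[lo] is in range on every call
-- the recursion makes (lo < hi ≤ len(cells)), so getD's default is never used.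
def pvOcupadasEn (cells : List Int) (lo hi : Nat) : Int :=
  if hi - lo = 0 then 0
  else if hi - lo = 1 then (if cells.getD lo 0 == 1 then 1 else 0)
  else pvOcupadasEn cells lo ((lo + hi) / 2) + pvOcupadasEn cells ((lo + hi) / 2) hi
termination_by hi - lo
decreasing_by all_goals omega

def contar_computadoras_alt (lab : List (List Int)) : Int × Int :=
  let cells := lab.flatMap (fun fila => fila)
  let ocupadas := pvOcupadasEn cells 0 cells.length
  (ocupadas, (cells.length : Int) - ocupadas)

-- ===== PRECONDITION & SPEC =====
def Spec_contar_computadoras (lab : List (List Int)) (out : Int × Int) : Prop := out = contar_computadoras_alt lab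
instance (lab : List (List Int)) (out : Int × Int) : Decidable (Spec_contar_computadoras lab out) := by unfold Spec_contar_computadoras; infer_instance

-- ===== CLAIM (what is proved, stated in full; the proofs are below) =====
def Claim_equal_contar_computadoras : Prop := ∀ (lab : List (List Int)), Dom_contar_computadoras lab → Spec_contar_computadoras lab (contar_computadoras lab)

-- ===== LEMMAS AND PROOFS =====

-- B's recursion counts the 1s of the slice [lo, hi)
theorem pvOcupadasEn_count (cells : List Int) (lo hi : Nat)
    (h1 : lo ≤ hi) (h2 : hi ≤ cells.length) :
    pvOcupadasEn cells lo hi = (((cells.drop lo).take (hi - lo)).count 1 : Int) := by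
  induction hn : hi - lo using Nat.strong_induction_on generalizing lo hi with
  | _ n ih =>
  rw [← hn]
  unfold pvOcupadasEn
  rcases n with _ | n
  · rw [if_pos hn, hn]
    simp only [List.take_zero, List.count_nil, Nat.cast_zero]
  rcases n with _ | n
  · -- hi - lo = 1: the slice is the single cell cells[lo]
    have hlo : lo < cells.length := by omega
    rw [if_neg (by omega), if_pos hn, hn]
    rw [List.getD_eq_getElem _ _ hlo]
    have ht : (cells.drop lo).take 1 = [cells[lo]] := by
      have h := List.drop_eq_getElem_cons hlo
      rw [h, List.take_succ_cons, List.take_zero]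
    rw [ht]
    by_cases hx : cells[lo] = 1 <;> simp [hx]
  · -- hi - lo ≥ 2: split at mid
    rw [if_neg (by omega), if_neg (by omega)]
    set mid := (lo + hi) / 2 with hmid
    have hm1 : lo < mid := by omega
    have hm2 : mid < hi := by omega
    rw [ih (mid - lo) (by omega) lo mid (by omega) (by omega) rfl,
        ih (hi - mid) (by omega) mid hi (by omega) h2 rfl]
    have hsplit : (cells.drop lo).take (hi - lo)
        = (cells.drop lo).take (mid - lo) ++ ((cells.drop lo).drop (mid - lo)).take (hi - mid) := by
      have he : hi - lo = (mid - lo) + (hi - mid) := by omega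
      rw [he, List.take_add]
    rw [hsplit, List.drop_drop, (by omega : lo + (mid - lo) = mid), List.count_append]
    push_cast
    ring

-- A's nested foldl adds (count of 1s, rest) of the flattened grid to the accumulator
theorem contar_row (g : List Int) : ∀ (a b : Int),
    g.foldl (fun acc2 computadora =>
      if computadora == 1 then (acc2.1 + 1, acc2.2) else (acc2.1, acc2.2 + 1)) (a, b)
    = (a + (g.count 1 : Int), b + ((g.length : Int) - (g.count 1 : Int))) := by
  induction g with
  | nil => intro a b; simp
  | cons x xs ihg =>
    intro a b
    simp only [List.foldl_cons]
    by_cases hx : x = 1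
    · rw [if_pos (by simp [hx]), ihg]
      have hc : (x == 1) = true := by simp [hx]
      simp only [List.count_cons, List.length_cons, hc, Prod.mk.injEq]
      constructor <;> push_cast <;> ring
    · rw [if_neg (by simp [hx]), ihg]
      have hc : (x == 1) = false := by simp [hx]
      simp only [List.count_cons, List.length_cons, hc, Prod.mk.injEq]
      constructor <;> push_cast <;> ring

theorem contar_foldl (lab : List (List Int)) : ∀ (a b : Int),
    lab.foldl (fun acc fila =>
      fila.foldl (fun acc2 computadora =>
        if computadora == 1 then (acc2.1 + 1, acc2.2) else (acc2.1, acc2.2 + 1)) acc) (a, b)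
    = (a + ((lab.flatMap (fun fila => fila)).count 1 : Int),
       b + (((lab.flatMap (fun fila => fila)).length : Int)
            - ((lab.flatMap (fun fila => fila)).count 1 : Int))) := by
  induction lab with
  | nil => intro a b; simp
  | cons f fs ih =>
    intro a b
    simp only [List.foldl_cons]
    rw [contar_row, ih]
    simp only [List.flatMap_cons, List.count_append, List.length_append, Prod.mk.injEq]
    constructor <;> push_cast <;> ring

-- ===== VERDICT (by name: the statement is the Claim_ definition above) =====
theorem contar_computadoras_spec : Claim_equal_contar_computadoras := by
  intro lab _
  unfold Spec_contar_computadoras contar_computadoras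
  simp only [contar_computadoras_alt]
  rw [contar_foldl,
      pvOcupadasEn_count _ 0 _ (Nat.zero_le _) (le_refl _)]
  simp [-List.length_flatten]
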